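-- pv_equiv track=rewrite | github.com/somebodnew/OmGTU | lab3_alg.py | find_best_purchase
-- ===== SOURCE A (Python) =====
-- import itertools
--
-- def find_best_purchase(needs, prices, budget):
--     best_combo = []
--     max_items = 0
--
--     all_items = []
--     for item, needed in needs.items():
--         if item in prices:
--             price = prices[item]
--             max_possible = min(needed, budget // price if price > 0 else needed)
--             all_items.extend([(item, price)] * max_possible)
--
--     n = len(all_items)
--     for r in range(1, n + 1):
--         for combo in itertools.combinations(all_items, r):
--             total = sum(price for _, price in combo)
--             if total <= budget and len(combo) > max_items:
--                 max_items = len(combo)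
--                 best_combo = combo
--
--     result = {}
--     for item, price in best_combo:
--         result[item] = result.get(item, 0) + 1
--
--     return result
-- ===== SOURCE B (Python) =====
-- def find_best_purchase(needs, prices, budget):
--     # Build the pool of purchasable copies (same multiset A builds).
--     pool = []
--     for item, needed in needs.items():
--         if item in prices:
--             price = prices[item]
--             cap = min(needed, budget // price) if price > 0 else needed
--             if cap > 0:
--                 pool.extend([(item, price)] * cap)
--     n = len(pool)
--
--     # rows[i][k] = minimal total price of k copies chosen from pool[i:] (None if impossible).
--     rows = [[0] + [None] * n]
--     for item, price in reversed(pool):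
--         prev = rows[-1]
--         row = [0]
--         for a, b in zip(prev, prev[1:]):
--             take = None if a is None else a + price
--             row.append(take if b is None or (take is not None and take <= b) else b)
--         rows.append(row)
--     rows.reverse()
--
--     # Largest affordable count.
--     L = 0
--     for k in range(n, 0, -1):
--         if rows[0][k] is not None and rows[0][k] <= budget:
--             L = k
--             break
--
--     # Lexicographically first feasible selection of L copies, counted per item.
--     counts = {}
--     rem = budget
--     k = L
--     for (item, price), nxt in zip(pool, rows[1:]):
--         if k == 0:
--             break
--         c = nxt[k - 1]
--         if c is not None and price + c <= rem:
--             counts[item] = counts.get(item, 0) + 1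
--             rem -= price
--             k -= 1
--     return counts
-- ===== Notes on version B (the rewrite author's own statement) =====
-- stated objective: faster
-- what changed: replaced the exhaustive enumeration of all item combinations (itertools.combinations for every size r) by a suffix min-cost dynamic-programming table from which the maximal affordable count and the lexicographically-first feasible selection are reconstructed directly
import Mathlib
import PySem

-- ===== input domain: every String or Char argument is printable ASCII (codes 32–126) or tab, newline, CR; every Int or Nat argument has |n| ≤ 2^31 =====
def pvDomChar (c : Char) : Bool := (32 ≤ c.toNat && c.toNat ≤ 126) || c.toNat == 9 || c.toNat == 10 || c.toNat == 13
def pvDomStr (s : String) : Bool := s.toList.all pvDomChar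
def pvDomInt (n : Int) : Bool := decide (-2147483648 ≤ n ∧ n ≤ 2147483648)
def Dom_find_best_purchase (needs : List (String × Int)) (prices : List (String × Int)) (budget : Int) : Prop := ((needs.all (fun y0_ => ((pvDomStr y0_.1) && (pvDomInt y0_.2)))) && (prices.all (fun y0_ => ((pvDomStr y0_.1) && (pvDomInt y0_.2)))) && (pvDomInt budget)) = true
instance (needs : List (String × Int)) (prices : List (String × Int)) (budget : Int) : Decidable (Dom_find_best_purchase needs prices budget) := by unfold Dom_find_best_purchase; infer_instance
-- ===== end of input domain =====

-- B replaces A's exhaustive enumeration of every combination size by a suffix min-cost DP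
-- table plus direct reconstruction (objective: faster).

-- ===== PORT A =====
-- itertools.combinations(l, r) in itertools' (lexicographic) order
def pvCombos {α : Type} : List α → Nat → List (List α)
  | _, 0 => [[]]
  | [], _+1 => []
  | x :: xs, r+1 => (pvCombos xs r).map (x :: ·) ++ pvCombos xs (r + 1)

-- A's first loop: build all_items
def pvPoolA (needs : List (String × Int)) (prices : List (String × Int)) (budget : Int) : List (String × Int) :=
  needs.foldl (fun acc pr =>
    match (PySem.Dict.mk prices).get? pr.1 with
    | none => acc
    | some price =>
      let mp := min pr.2 (if price > 0 then PySem.Int.floordiv budget price else pr.2)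
      acc ++ List.replicate mp.toNat (pr.1, price)) []

-- the body of A's combination loop
def pvStepA (budget : Int) (st : Int × List (String × Int)) (c : List (String × Int)) : Int × List (String × Int) :=
  let total := (c.map (·.2)).sum
  if total ≤ budget ∧ st.1 < (c.length : Int) then ((c.length : Int), c) else st

-- A's final loop: count the chosen copies per item into a dict
def pvCount (l : List (String × Int)) : List (String × Int) :=
  (l.foldl (fun d pr => d.insert pr.1 (d.getD pr.1 0 + 1)) (PySem.Dict.empty : PySem.Dict String Int)).items

def find_best_purchase (needs : List (String × Int)) (prices : List (String × Int)) (budget : Int) : List (String × Int) :=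
  let all_items := pvPoolA needs prices budget
  let n := all_items.length
  let st := (PySem.List.pyRange 1 ((n : Int) + 1) 1).foldl (fun st r =>
      (pvCombos all_items r.toNat).foldl (pvStepA budget) st)
    ((0 : Int), ([] : List (String × Int)))
  pvCount st.2

-- ===== PORT B =====
-- one DP row from the previous one: row[0] = 0, row[k] = min(prev[k-1] + price, prev[k])  (none = impossible)
def pvNextRow (price : Int) (prev : List (Option Int)) : List (Option Int) :=
  some 0 :: (prev.zip prev.tail).map (fun ab =>
    let take := ab.1.map (· + price)
    match ab.2, take with
    | none, _ => take
    | some b, some t => if t ≤ b then some t else some b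
    | some b, none => some b)

-- B's first loop: the same pool of purchasable copies
def pvPoolB (needs : List (String × Int)) (prices : List (String × Int)) (budget : Int) : List (String × Int) :=
  needs.foldl (fun acc pr =>
    match (PySem.Dict.mk prices).get? pr.1 with
    | none => acc
    | some price =>
      let cap := if price > 0 then min pr.2 (PySem.Int.floordiv budget price) else pr.2
      if cap > 0 then acc ++ List.replicate cap.toNat (pr.1, price) else acc) []

-- the body of B's reconstruction loop (state: counts dict, remaining budget, copies still to pick)
def pvStepB (st : PySem.Dict String Int × Int × Int) (x : (String × Int) × List (Option Int)) :
    PySem.Dict String Int × Int × Int :=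
  if st.2.2 = (0 : Int) then st else
  match x.2.getD (st.2.2 - 1).toNat none with
  | none => st
  | some c =>
    if x.1.2 + c ≤ st.2.1 then
      (st.1.insert x.1.1 (st.1.getD x.1.1 0 + 1), st.2.1 - x.1.2, st.2.2 - 1)
    else st

def find_best_purchase_alt (needs : List (String × Int)) (prices : List (String × Int)) (budget : Int) : List (String × Int) :=
  let pool := pvPoolB needs prices budget
  let n := pool.length
  -- rows[i][k] = minimal total of k copies from pool[i:]; built back to front
  let rows := pool.reverse.foldl (fun rs pr =>
      match rs with
      | [] => []
      | r :: _ => pvNextRow pr.2 r :: rs) [some 0 :: List.replicate n (none : Option Int)]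
  let first := rows.headD []
  -- largest affordable count: first k in n, n-1, …, 1 with rows[0][k] ≤ budget
  let L : Int := match (PySem.List.pyRange (n : Int) 0 (-1)).find? (fun k =>
      match first.getD k.toNat none with
      | none => false
      | some v => decide (v ≤ budget)) with
    | some k => k
    | none => 0
  -- lexicographically first feasible selection of L copies, counted per item
  let st := (pool.zip rows.tail).foldl pvStepB
    ((PySem.Dict.empty : PySem.Dict String Int), budget, L)
  st.1.items

-- ===== PRECONDITION & SPEC =====
def Spec_find_best_purchase (needs : List (String × Int)) (prices : List (String × Int)) (budget : Int) (out : List (String × Int)) : Prop := out = find_best_purchase_alt needs prices budget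
instance (needs : List (String × Int)) (prices : List (String × Int)) (budget : Int) (out : List (String × Int)) : Decidable (Spec_find_best_purchase needs prices budget out) := by unfold Spec_find_best_purchase; infer_instance

-- ===== CLAIM (what is proved, stated in full; the proofs are below) =====
def Claim_equal_find_best_purchase : Prop := ∀ (needs : List (String × Int)) (prices : List (String × Int)) (budget : Int), Dom_find_best_purchase needs prices budget → Spec_find_best_purchase needs prices budget (find_best_purchase needs prices budget)

-- ===== LEMMAS AND PROOFS =====

-- ---- spec-side vocabulary ----
-- optional minimum (none = no candidate)
def pvOmin : Option Int → Option Int → Option Int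
  | none, o => o
  | some a, none => some a
  | some a, some b => some (min a b)

-- minimal sum of k elements of a list (none = fewer than k elements)
def pvMsum : List Int → Nat → Option Int
  | _, 0 => some 0
  | [], _+1 => none
  | p :: xs, k+1 => pvOmin ((pvMsum xs k).map (· + p)) (pvMsum xs (k + 1))

def pvOmins : List Int → Option Int
  | [] => none
  | x :: xs => pvOmin (some x) (pvOmins xs)

def pvLe (o : Option Int) (b : Int) : Prop := ∃ v, o = some v ∧ v ≤ b

-- the DP row of a suffix, and the list of all suffix rows
def pvRowOf (n : Nat) : List (String × Int) → List (Option Int)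
  | [] => some 0 :: List.replicate n none
  | x :: xs => pvNextRow x.2 (pvRowOf n xs)

def pvRows (n : Nat) : List (String × Int) → List (List (Option Int))
  | [] => [some 0 :: List.replicate n none]
  | x :: xs => pvNextRow x.2 ((pvRows n xs).headD []) :: pvRows n xs

-- the greedy lexicographically-first feasible selection of k copies
def pvGsel : List (String × Int) → Nat → Int → List (String × Int)
  | [], _, _ => []
  | _ :: _, 0, _ => []
  | x :: xs, k+1, rem =>
    match pvMsum (xs.map (·.2)) k with
    | none => pvGsel xs (k+1) rem
    | some t => if x.2 + t ≤ rem then x :: pvGsel xs k (rem - x.2) else pvGsel xs (k+1) rem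

def pvP (budget : Int) : List (String × Int) → Bool := fun c => decide ((c.map (·.2)).sum ≤ budget)

def pvFeas (pool : List (String × Int)) (budget : Int) (r : Nat) : Bool :=
  ((pvCombos pool r).find? (pvP budget)).isSome

def pvMaxFeas (pool : List (String × Int)) (budget : Int) : Nat → Nat
  | 0 => 0
  | r+1 => if pvFeas pool budget (r+1) then r+1 else pvMaxFeas pool budget r

-- ---- the two pools are equal ----
theorem pvPool_eq (needs prices : List (String × Int)) (budget : Int) :
    pvPoolB needs prices budget = pvPoolA needs prices budget := by

  unfold pvPoolA pvPoolB
  congr 1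
  funext acc pr
  cases h : (PySem.Dict.mk prices).get? pr.1 with
  | none => rfl
  | some price =>
    simp only
    by_cases hp : price > 0
    · simp only [hp, if_true]
      by_cases hc : min pr.2 (PySem.Int.floordiv budget price) > 0
      · simp [hc]
      · have h0 : (min pr.2 (PySem.Int.floordiv budget price)).toNat = 0 := by omega
        simp [hc, h0]
    · simp only [hp, if_false, min_self]
      by_cases hc : pr.2 > 0
      · simp [hc]
      · have h0 : pr.2.toNat = 0 := by omega
        simp [hc, h0]

-- ---- combinations ----
theorem pvCombos_length {α : Type} : ∀ (l : List α) (r : Nat), ∀ c ∈ pvCombos l r, c.length = r := by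

  intro l
  induction l with
  | nil =>
    intro r c hc
    cases r with
    | zero => simp [pvCombos] at hc; simp [hc]
    | succ r => simp [pvCombos] at hc
  | cons x xs ih =>
    intro r c hc
    cases r with
    | zero => simp [pvCombos] at hc; simp [hc]
    | succ r =>
      simp only [pvCombos, List.mem_append, List.mem_map] at hc
      rcases hc with ⟨c', hc', rfl⟩ | hc
      · simp [ih r c' hc']
      · exact ih (r+1) c hc

theorem pvCombos_map {α β : Type} (f : α → β) :
    ∀ (l : List α) (r : Nat), pvCombos (l.map f) r = (pvCombos l r).map (List.map f) := by

  intro l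
  induction l with
  | nil => intro r; cases r <;> simp [pvCombos]
  | cons x xs ih =>
    intro r
    cases r with
    | zero => simp [pvCombos]
    | succ r => simp [pvCombos, ih, List.map_map]

-- ---- optional minima ----
theorem pvOmin_assoc (x y z : Option Int) : pvOmin (pvOmin x y) z = pvOmin x (pvOmin y z) := by

  cases x <;> cases y <;> cases z <;> simp [pvOmin, min_assoc]

theorem pvOmins_append (a b : List Int) : pvOmins (a ++ b) = pvOmin (pvOmins a) (pvOmins b) := by

  induction a with
  | nil => simp [pvOmins, pvOmin]
  | cons x xs ih => simp [pvOmins, ih, pvOmin_assoc]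

theorem pvOmins_map_add (l : List Int) (p : Int) :
    pvOmins (l.map (fun s => p + s)) = (pvOmins l).map (· + p) := by

  induction l with
  | nil => simp [pvOmins]
  | cons x xs ih =>
    simp only [List.map_cons, pvOmins, ih]
    cases h : pvOmins xs with
    | none => simp [pvOmin, Int.add_comm]
    | some m => simp [pvOmin, Int.add_comm p x, Int.min_add_right]

theorem pvLe_omin (x y : Option Int) (b : Int) : pvLe (pvOmin x y) b ↔ pvLe x b ∨ pvLe y b := by

  cases x <;> cases y <;> simp [pvOmin, pvLe]

theorem pvLe_omins (xs : List Int) (b : Int) : pvLe (pvOmins xs) b ↔ ∃ x ∈ xs, x ≤ b := by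

  induction xs with
  | nil => simp [pvOmins, pvLe]
  | cons x xs ih =>
    rw [show pvOmins (x::xs) = pvOmin (some x) (pvOmins xs) from rfl, pvLe_omin, ih]
    simp [pvLe]

-- ---- pvMsum is the least combination sum ----
theorem pvMsum_eq_omins : ∀ (ps : List Int) (k : Nat),
    pvMsum ps k = pvOmins ((pvCombos ps k).map List.sum) := by

  intro ps
  induction ps with
  | nil => intro k; cases k <;> simp [pvMsum, pvCombos, pvOmins, pvOmin]
  | cons p xs ih =>
    intro k
    cases k with
    | zero => simp [pvMsum, pvCombos, pvOmins]; rfl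
    | succ k =>
      rw [show pvMsum (p :: xs) (k+1) = pvOmin ((pvMsum xs k).map (· + p)) (pvMsum xs (k + 1)) from rfl]
      rw [show pvCombos (p :: xs) (k+1) = (pvCombos xs k).map (p :: ·) ++ pvCombos xs (k + 1) from rfl]
      rw [List.map_append, pvOmins_append, List.map_map, ih, ih]
      congr 1
      rw [show (List.sum ∘ (p :: ·) : List Int → Int) = (fun s => p + s) ∘ List.sum from funext fun c => by simp]
      rw [← List.map_map, pvOmins_map_add]

theorem pvLe_msum_iff (l : List (String × Int)) (k : Nat) (b : Int) :
    pvLe (pvMsum (l.map (·.2)) k) b ↔ ∃ c ∈ pvCombos l k, (c.map (·.2)).sum ≤ b := by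

  rw [pvMsum_eq_omins, pvCombos_map (fun x : String × Int => x.2) l k, List.map_map, pvLe_omins]
  constructor
  · rintro ⟨x, hx, hxb⟩
    simp only [List.mem_map, Function.comp] at hx
    obtain ⟨c, hc, rfl⟩ := hx
    exact ⟨c, hc, hxb⟩
  · rintro ⟨c, hc, hcb⟩
    exact ⟨(c.map (·.2)).sum, List.mem_map.mpr ⟨c, hc, rfl⟩, hcb⟩

-- ---- rows ----
theorem pvRowOf_length (n : Nat) : ∀ l, (pvRowOf n l).length = n + 1 := by

  intro l
  induction l with
  | nil => simp [pvRowOf]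
  | cons x xs ih =>
    simp only [pvRowOf, pvNextRow, List.length_cons, List.length_map, List.length_zip,
      List.length_tail, ih]
    omega

theorem pvRowOf_getD (n : Nat) : ∀ (l : List (String × Int)) (k : Nat), k ≤ n →
    (pvRowOf n l).getD k none = pvMsum (l.map (·.2)) k := by

  intro l
  induction l with
  | nil =>
    intro k hk
    cases k with
    | zero => simp [pvRowOf, pvMsum]
    | succ k =>
      show (List.replicate n (none : Option Int)).getD k none = pvMsum [] (k+1)
      rw [show pvMsum [] (k+1) = none from rfl]
      rw [List.getD_eq_getElem?_getD]
      cases h : (List.replicate n (none : Option Int))[k]? with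
      | none => rfl
      | some v =>
        have := List.mem_of_getElem? h
        simp [List.eq_of_mem_replicate this]
  | cons x xs ih =>
    intro k hk
    cases k with
    | zero => simp [pvRowOf, pvNextRow, pvMsum]
    | succ k =>
      have hlen : (pvRowOf n xs).length = n + 1 := pvRowOf_length n xs
      have hzlen : ((pvRowOf n xs).zip (pvRowOf n xs).tail).length = n := by
        simp [List.length_zip, List.length_tail, hlen]
      show (((pvRowOf n xs).zip (pvRowOf n xs).tail).map _).getD k none = _
      have hk' : k < n := by omega
      rw [List.getD_eq_getElem (hn := by simpa [hzlen] using hk')]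
      rw [List.getElem_map, List.getElem_zip, List.getElem_tail]
      have e1 : (pvRowOf n xs)[k] = pvMsum (xs.map (·.2)) k := by
        rw [← List.getD_eq_getElem (d := none) (hn := by omega), ih k (by omega)]
      have e2 : (pvRowOf n xs)[k+1] = pvMsum (xs.map (·.2)) (k+1) := by
        rw [← List.getD_eq_getElem (d := none) (hn := by omega), ih (k+1) (by omega)]
      rw [e1, e2]
      rw [show pvMsum ((x :: xs).map (·.2)) (k+1) =
        pvOmin ((pvMsum (xs.map (·.2)) k).map (· + x.2)) (pvMsum (xs.map (·.2)) (k + 1)) from rfl]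
      cases pvMsum (xs.map (·.2)) k with
      | none => cases pvMsum (xs.map (·.2)) (k+1) <;> simp [pvOmin]
      | some t =>
        cases pvMsum (xs.map (·.2)) (k+1) with
        | none => simp [pvOmin]
        | some s =>
          simp only [pvOmin, min_def, Option.map_some]
          split <;> rfl

theorem pvRows_ne_nil (n : Nat) : ∀ l, pvRows n l ≠ [] := by

  intro l
  cases l <;> simp [pvRows]

theorem pvRows_head (n : Nat) : ∀ l, (pvRows n l).headD [] = pvRowOf n l := by

  intro l
  induction l with
  | nil => simp [pvRows, pvRowOf]
  | cons x xs ih =>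
    rw [show pvRows n (x :: xs) = pvNextRow x.2 ((pvRows n xs).headD []) :: pvRows n xs from rfl,
      List.headD_cons, ih]
    rfl

theorem pvRows_eq (n : Nat) (pool : List (String × Int)) :
    pool.reverse.foldl (fun rs pr =>
      match rs with
      | [] => []
      | r :: _ => pvNextRow pr.2 r :: rs) [some 0 :: List.replicate n (none : Option Int)]
    = pvRows n pool := by

  rw [List.foldl_reverse]
  induction pool with
  | nil => rfl
  | cons x xs ih =>
    rw [List.foldr_cons, ih]
    obtain ⟨h, t, ht⟩ := List.exists_cons_of_ne_nil (pvRows_ne_nil n xs)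
    rw [ht]
    show pvNextRow x.2 h :: (h :: t) = pvRows n (x :: xs)
    have : (pvRows n xs).headD [] = h := by rw [ht]; rfl
    rw [show pvRows n (x :: xs) = pvNextRow x.2 ((pvRows n xs).headD []) :: pvRows n xs from rfl,
      this, ht]


theorem pvGsel_nil (k : Nat) (rem : Int) : pvGsel [] k rem = [] := by cases k <;> rfl

theorem pvFeas_iff (pool : List (String × Int)) (budget : Int) (r : Nat) :
    pvFeas pool budget r = true ↔ pvLe (pvMsum (pool.map (·.2)) r) budget := by
  rw [pvLe_msum_iff]
  simp [pvFeas, List.find?_isSome, pvP]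

-- ---- the first feasible combination is the greedy selection ----
theorem pvFind_eq_gsel : ∀ (l : List (String × Int)) (k : Nat) (rem : Int),
    (∃ c ∈ pvCombos l k, (c.map (·.2)).sum ≤ rem) →
    (pvCombos l k).find? (pvP rem) = some (pvGsel l k rem) := by

  intro l
  induction l with
  | nil =>
    intro k rem h
    cases k with
    | zero =>
      obtain ⟨c, hc, hcb⟩ := h
      simp [pvCombos] at hc
      subst hc
      simp only [pvCombos, pvGsel]
      rw [List.find?_cons_of_pos (by simpa [pvP] using hcb)]
    | succ k => obtain ⟨c, hc, _⟩ := h; simp [pvCombos] at hc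
  | cons x xs ih =>
    intro k rem h
    cases k with
    | zero =>
      obtain ⟨c, hc, hcb⟩ := h
      simp [pvCombos] at hc
      subst hc
      show ([[]] : List (List (String × Int))).find? (pvP rem) = some []
      rw [List.find?_cons_of_pos (by simpa [pvP] using hcb)]
    | succ k =>
      have hmem : ∀ c, c ∈ pvCombos (x :: xs) (k+1) ↔
          (∃ c', c' ∈ pvCombos xs k ∧ x :: c' = c) ∨ c ∈ pvCombos xs (k+1) := by
        intro c
        rw [show pvCombos (x :: xs) (k+1) = (pvCombos xs k).map (x :: ·) ++ pvCombos xs (k + 1) from rfl]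
        simp
      rw [show pvCombos (x :: xs) (k+1) = (pvCombos xs k).map (x :: ·) ++ pvCombos xs (k + 1) from rfl]
      rw [List.find?_append, List.find?_map]
      have hpred : (pvP rem ∘ (x :: ·)) = pvP (rem - x.2) := by
        funext c
        simp only [pvP, Function.comp, List.map_cons, List.sum_cons]
        exact decide_eq_decide.mpr (by omega)
      rw [show pvGsel (x :: xs) (k+1) rem = (match pvMsum (xs.map (·.2)) k with
        | none => pvGsel xs (k+1) rem
        | some t => if x.2 + t ≤ rem then x :: pvGsel xs k (rem - x.2) else pvGsel xs (k+1) rem) from rfl]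
      cases hms : pvMsum (xs.map (·.2)) k with
      | some t =>
        by_cases htake : x.2 + t ≤ rem
        · have hex : ∃ c ∈ pvCombos xs k, (c.map (·.2)).sum ≤ rem - x.2 := by
            rw [← pvLe_msum_iff]
            exact ⟨t, hms, by omega⟩
          rw [hpred, ih k (rem - x.2) hex]
          simp [htake]
        · have hnone : (pvCombos xs k).find? (pvP rem ∘ (x :: ·)) = none := by
            rw [hpred]
            apply List.find?_eq_none.mpr
            intro c hc
            simp only [pvP, decide_eq_true_eq]
            intro hle
            have hple : pvLe (pvMsum (xs.map (·.2)) k) (rem - x.2) :=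
              (pvLe_msum_iff xs k _).mpr ⟨c, hc, hle⟩
            rw [hms] at hple
            obtain ⟨v, hv, hvb⟩ := hple
            cases hv
            omega
          have hex2 : ∃ c ∈ pvCombos xs (k+1), (c.map (·.2)).sum ≤ rem := by
            obtain ⟨c, hc, hcb⟩ := h
            rcases (hmem c).mp hc with ⟨c', hc', rfl⟩ | hc2
            · exfalso
              have hple : pvLe (pvMsum (xs.map (·.2)) k) (rem - x.2) :=
                (pvLe_msum_iff xs k _).mpr ⟨c', hc', by simp at hcb; omega⟩
              rw [hms] at hple
              obtain ⟨v, hv, hvb⟩ := hple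
              cases hv
              omega
            · exact ⟨c, hc2, hcb⟩
          rw [hnone, ih (k+1) rem hex2]
          simp [htake]
      | none =>
        have hnone : (pvCombos xs k).find? (pvP rem ∘ (x :: ·)) = none := by
          rw [hpred]
          apply List.find?_eq_none.mpr
          intro c hc
          simp only [pvP, decide_eq_true_eq]
          intro hle
          have hple : pvLe (pvMsum (xs.map (·.2)) k) (rem - x.2) :=
            (pvLe_msum_iff xs k _).mpr ⟨c, hc, hle⟩
          rw [hms] at hple
          obtain ⟨v, hv, hvb⟩ := hple
          cases hv
        have hex2 : ∃ c ∈ pvCombos xs (k+1), (c.map (·.2)).sum ≤ rem := by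
          obtain ⟨c, hc, hcb⟩ := h
          rcases (hmem c).mp hc with ⟨c', hc', rfl⟩ | hc2
          · exfalso
            have hple : pvLe (pvMsum (xs.map (·.2)) k) (rem - x.2) :=
              (pvLe_msum_iff xs k _).mpr ⟨c', hc', by simp at hcb; omega⟩
            rw [hms] at hple
            obtain ⟨v, hv, hvb⟩ := hple
            cases hv
          · exact ⟨c, hc2, hcb⟩
        rw [hnone, ih (k+1) rem hex2]
        simp

-- ---- A's combination loop ----
theorem pvInnerFixed (budget : Int) : ∀ (cs : List (List (String × Int))) (r : Nat) (b : List (String × Int)),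
    (∀ c ∈ cs, c.length = r) →
    cs.foldl (pvStepA budget) ((r : Int), b) = ((r : Int), b) := by

  intro cs
  induction cs with
  | nil => intro r b _; rfl
  | cons c cs ih =>
    intro r b h
    rw [List.foldl_cons]
    have hc : c.length = r := h c List.mem_cons_self
    have hstep : pvStepA budget ((r : Int), b) c = ((r : Int), b) := by
      simp [pvStepA, hc]
    rw [hstep]
    exact ih r b (fun c' hc' => h c' (List.mem_cons_of_mem _ hc'))

theorem pvInnerEq (budget : Int) : ∀ (cs : List (List (String × Int))) (r : Nat) (m : Int) (b : List (String × Int)),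
    (∀ c ∈ cs, c.length = r) → m < (r : Int) →
    cs.foldl (pvStepA budget) (m, b) =
      match cs.find? (pvP budget) with
      | some c0 => ((r : Int), c0)
      | none => (m, b) := by

  intro cs
  induction cs with
  | nil => intro r m b _ _; rfl
  | cons c cs ih =>
    intro r m b h hm
    have hc : c.length = r := h c List.mem_cons_self
    rw [List.foldl_cons]
    by_cases hp : pvP budget c = true
    · have hstep : pvStepA budget (m, b) c = ((r : Int), c) := by
        simp only [pvP, decide_eq_true_eq] at hp
        simp [pvStepA, hc, hp, hm]
      rw [hstep, pvInnerFixed budget cs r c (fun c' hc' => h c' (List.mem_cons_of_mem _ hc'))]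
      rw [List.find?_cons_of_pos hp]
    · have hstep : pvStepA budget (m, b) c = (m, b) := by
        simp only [pvP, decide_eq_true_eq] at hp
        simp [pvStepA, hp]
      rw [hstep, ih r m b (fun c' hc' => h c' (List.mem_cons_of_mem _ hc')) hm]
      rw [List.find?_cons_of_neg (by simpa using hp)]

theorem pvMaxFeas_le (pool : List (String × Int)) (budget : Int) : ∀ N, pvMaxFeas pool budget N ≤ N := by

  intro N
  induction N with
  | zero => simp [pvMaxFeas]
  | succ N ih => rw [pvMaxFeas]; split <;> omega

theorem pvMaxFeas_feas (pool : List (String × Int)) (budget : Int) : ∀ N r,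
    pvMaxFeas pool budget N = r + 1 → pvFeas pool budget (r + 1) = true := by

  intro N
  induction N with
  | zero => intro r h; simp [pvMaxFeas] at h
  | succ N ih =>
    intro r h
    rw [pvMaxFeas] at h
    by_cases hf : pvFeas pool budget (N+1) = true
    · rw [if_pos hf] at h
      have : r = N := by omega
      subst this
      exact hf
    · rw [if_neg hf] at h
      exact ih r h

theorem pvOuterEq (pool : List (String × Int)) (budget : Int) : ∀ N : Nat,
    (PySem.List.pyRange 1 ((N : Int) + 1) 1).foldl (fun st r =>
        (pvCombos pool r.toNat).foldl (pvStepA budget) st) ((0 : Int), ([] : List (String × Int)))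
    = ((pvMaxFeas pool budget N : Int),
        match (pvCombos pool (pvMaxFeas pool budget N)).find? (pvP budget) with
        | some c0 => c0
        | none => []) := by

  intro N
  induction N with
  | zero =>
    rw [show (((0:Nat):Int) + 1) = 1 by norm_num, PySem.List.pyRange_one_eq_nil le_rfl,
      List.foldl_nil]
    rw [show pvMaxFeas pool budget 0 = 0 from rfl]
    cases hf : (pvCombos pool 0).find? (pvP budget) with
    | none => rfl
    | some c0 =>
      have hmem := List.mem_of_find?_eq_some hf
      rw [show pvCombos pool 0 = [[]] from by cases pool <;> rfl] at hmem
      simp at hmem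
      subst hmem
      rfl
  | succ N ih =>
    have hcast : (((N+1:Nat)):Int) + 1 = ((N:Int) + 1) + 1 := by push_cast; ring
    rw [hcast, PySem.List.pyRange_one_succ_right (by omega), List.foldl_append, ih,
      List.foldl_cons, List.foldl_nil]
    have htn : ((N:Int) + 1).toNat = N + 1 := by omega
    rw [htn]
    rw [pvInnerEq budget (pvCombos pool (N+1)) (N+1) _ _ (pvCombos_length pool (N+1))
      (by have := pvMaxFeas_le pool budget N; exact_mod_cast Nat.lt_succ_of_le this)]
    rw [show pvMaxFeas pool budget (N+1) = if pvFeas pool budget (N+1) then N+1 else pvMaxFeas pool budget N from rfl]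
    by_cases hf : pvFeas pool budget (N+1) = true
    · obtain ⟨c0, hc0⟩ := Option.isSome_iff_exists.mp hf
      rw [if_pos hf, hc0]
    · have hnone : (pvCombos pool (N+1)).find? (pvP budget) = none := by
        unfold pvFeas at hf
        exact Option.not_isSome_iff_eq_none.mp (by simpa using hf)
      rw [hnone, if_neg hf]

-- ---- B's descending search finds the same maximal count ----
theorem pvLeq (pool : List (String × Int)) (budget : Int) (n : Nat) : ∀ N : Nat, N ≤ n →
    (match (PySem.List.pyRange (N : Int) 0 (-1)).find? (fun k =>
        match (pvRowOf n pool).getD k.toNat none with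
        | none => false
        | some v => decide (v ≤ budget)) with
     | some k => k
     | none => 0) = ((pvMaxFeas pool budget N : Int)) := by

  intro N
  induction N with
  | zero =>
    intro _
    rw [show ((0:Nat):Int) = 0 from rfl, PySem.List.pyRange_neg_one_eq_nil le_rfl]
    rfl
  | succ N ih =>
    intro hN
    rw [PySem.List.pyRange_neg_one_cons (by exact_mod_cast Nat.succ_pos N)]
    have htn : (((N+1:Nat)):Int).toNat = N + 1 := by omega
    have hrow : (pvRowOf n pool).getD ((((N+1:Nat)):Int)).toNat none = pvMsum (pool.map (·.2)) (N+1) := by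
      rw [htn]
      exact pvRowOf_getD n pool (N+1) hN
    rw [List.find?_cons]
    by_cases hf : pvFeas pool budget (N+1) = true
    · obtain ⟨v, hv, hvb⟩ := (pvFeas_iff pool budget (N+1)).mp hf
      have hd : decide (v ≤ budget) = true := by simpa using hvb
      simp only [hrow, hv, hd]
      rw [show pvMaxFeas pool budget (N+1) = if pvFeas pool budget (N+1) then N+1 else pvMaxFeas pool budget N from rfl,
        if_pos hf]
    · have hshift : (((N+1:Nat)):Int) - 1 = ((N:Nat):Int) := by push_cast; ring
      cases hm : pvMsum (pool.map (·.2)) (N+1) with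
      | none =>
        simp only [hrow, hm]
        rw [hshift, ih (by omega),
          show pvMaxFeas pool budget (N+1) = if pvFeas pool budget (N+1) then N+1 else pvMaxFeas pool budget N from rfl,
          if_neg hf]
      | some v =>
        have hd : decide (v ≤ budget) = false := by
          simp only [decide_eq_false_iff_not]
          intro hvb
          exact hf ((pvFeas_iff pool budget (N+1)).mpr ⟨v, hm, hvb⟩)
        simp only [hrow, hm, hd]
        rw [hshift, ih (by omega),
          show pvMaxFeas pool budget (N+1) = if pvFeas pool budget (N+1) then N+1 else pvMaxFeas pool budget N from rfl,
          if_neg hf]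

-- ---- B's reconstruction loop counts the greedy selection ----
theorem pvStepB_zero : ∀ (pairs : List ((String × Int) × List (Option Int)))
    (st : PySem.Dict String Int × Int × Int), st.2.2 = 0 → pairs.foldl pvStepB st = st := by

  intro pairs
  induction pairs with
  | nil => intro st h; rfl
  | cons p ps ih =>
    intro st h
    rw [List.foldl_cons, show pvStepB st p = st from by simp [pvStepB, h]]
    exact ih st h

theorem pvRecon (n : Nat) : ∀ (l : List (String × Int)) (d : PySem.Dict String Int) (rem : Int) (k : Nat),
    k ≤ n →
    ((l.zip (pvRows n l).tail).foldl pvStepB (d, rem, (k : Int))).1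
      = (pvGsel l k rem).foldl (fun d pr => d.insert pr.1 (d.getD pr.1 0 + 1)) d := by

  intro l
  induction l with
  | nil =>
    intro d rem k _
    rw [show (pvRows n ([] : List (String × Int))).tail = [] from rfl]
    rw [List.zip_nil_right, List.foldl_nil, pvGsel_nil, List.foldl_nil]
  | cons x xs ih =>
    intro d rem k hk
    have hcons : pvRows n xs = pvRowOf n xs :: (pvRows n xs).tail := by
      obtain ⟨h, t, ht⟩ := List.exists_cons_of_ne_nil (pvRows_ne_nil n xs)
      have hh : (pvRows n xs).headD [] = pvRowOf n xs := pvRows_head n xs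
      rw [ht] at hh ⊢
      rw [List.headD_cons] at hh
      rw [hh]
      rfl
    rw [show (pvRows n (x :: xs)).tail = pvRows n xs from rfl, hcons,
      List.zip_cons_cons, List.foldl_cons]
    cases k with
    | zero =>
      have hstep : pvStepB (d, rem, ((0:Nat):Int)) (x, pvRowOf n xs) = (d, rem, 0) := by
        simp [pvStepB]
      rw [hstep, pvStepB_zero _ _ rfl]
      rw [show pvGsel (x :: xs) 0 rem = [] from rfl, List.foldl_nil]
    | succ k =>
      have hne : ¬ ((((k+1:Nat)):Int) = 0) := by omega
      have hidx : (((((k+1:Nat)):Int)) - 1).toNat = k := by omega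
      have hrow : (pvRowOf n xs).getD (((((k+1:Nat)):Int)) - 1).toNat none = pvMsum (xs.map (·.2)) k := by
        rw [hidx]
        exact pvRowOf_getD n xs k (by omega)
      rw [show pvGsel (x :: xs) (k+1) rem = (match pvMsum (xs.map (·.2)) k with
        | none => pvGsel xs (k+1) rem
        | some t => if x.2 + t ≤ rem then x :: pvGsel xs k (rem - x.2) else pvGsel xs (k+1) rem) from rfl]
      simp only [pvStepB, hne, if_false]
      rw [hrow]
      cases hms : pvMsum (xs.map (·.2)) k with
      | none => exact ih d rem (k+1) hk
      | some c =>
        by_cases htake : x.2 + c ≤ rem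
        · simp only [htake, if_true]
          have hk1 : ((((k+1:Nat)):Int)) - 1 = ((k:Nat):Int) := by push_cast; ring
          rw [hk1]
          rw [ih (d.insert x.1 (d.getD x.1 0 + 1)) (rem - x.2) k (by omega)]
          rw [List.foldl_cons]
        · simp only [htake, if_false]
          exact ih d rem (k+1) hk

theorem pvGsel_zero (l : List (String × Int)) (rem : Int) : pvGsel l 0 rem = [] := by

  cases l <;> rfl

-- ===== VERDICT (by name: the statement is the Claim_ definition above) =====
theorem find_best_purchase_spec : Claim_equal_find_best_purchase := by
  intro needs prices budget _
  show find_best_purchase needs prices budget = find_best_purchase_alt needs prices budget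
  simp only [find_best_purchase, find_best_purchase_alt]
  rw [pvPool_eq]
  rw [pvRows_eq]
  rw [pvRows_head]
  rw [pvLeq (pvPoolA needs prices budget) budget (pvPoolA needs prices budget).length
    (pvPoolA needs prices budget).length le_rfl]
  rw [pvOuterEq (pvPoolA needs prices budget) budget (pvPoolA needs prices budget).length]
  rw [pvRecon (pvPoolA needs prices budget).length (pvPoolA needs prices budget) _ budget
    (pvMaxFeas (pvPoolA needs prices budget) budget (pvPoolA needs prices budget).length)
    (pvMaxFeas_le (pvPoolA needs prices budget) budget (pvPoolA needs prices budget).length)]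
  cases hM : pvMaxFeas (pvPoolA needs prices budget) budget (pvPoolA needs prices budget).length with
  | zero =>
    rw [pvGsel_zero, List.foldl_nil]
    cases hf : (pvCombos (pvPoolA needs prices budget) 0).find? (pvP budget) with
    | none => rfl
    | some c0 =>
      have hmem := List.mem_of_find?_eq_some hf
      rw [show pvCombos (pvPoolA needs prices budget) 0 = [[]] from by
        cases (pvPoolA needs prices budget) <;> rfl] at hmem
      simp at hmem
      subst hmem
      rfl
  | succ r =>
    have hfeas := pvMaxFeas_feas (pvPoolA needs prices budget) budget
      (pvPoolA needs prices budget).length r hM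
    have hex : ∃ c ∈ pvCombos (pvPoolA needs prices budget) (r+1), (c.map (·.2)).sum ≤ budget :=
      (pvLe_msum_iff (pvPoolA needs prices budget) (r+1) budget).mp
        ((pvFeas_iff (pvPoolA needs prices budget) budget (r+1)).mp hfeas)
    rw [pvFind_eq_gsel (pvPoolA needs prices budget) (r+1) budget hex]
    rfl
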